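-- pv_equiv track=rewrite | github.com/yuelfei/NNBA | boundary_assembly_Lite/new_yuefei_tf.py | get_num_class
-- ===== SOURCE A (Python) =====
-- def get_num_class(label_list):
--     if("array" in str(type(label_list))):
--         label_list=label_list.tolist()
--         # label_list=[node[0] for node in label_list]
--     class_type={}
--     for node in label_list:
--         class_name=node[:3]
--         if(class_name not in class_type):
--             class_type[class_name]=1
--         else:class_type[class_name]+=1
--     b = sorted(class_type.items(), key=lambda item: item[0])
--     test = {}
--     for node in b:
--         test[node[0]] = node[1]
--     return test
-- ===== SOURCE B (Python) =====
-- def get_num_class(label_list):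
--     if("array" in str(type(label_list))):
--         label_list = label_list.tolist()
--     prefixes = sorted(node[:3] for node in label_list)
--     runs = []
--     for p in prefixes:
--         if runs and runs[-1][0] == p:
--             runs[-1] = (p, runs[-1][1] + 1)
--         else:
--             runs.append((p, 1))
--     return dict(runs)
-- ===== Notes on version B (the rewrite author's own statement) =====
-- stated objective: alternative
-- what changed: Replaces hash-counting into a dict followed by sorting the items by key with sort-all-prefixes-first and a single consecutive-run grouping pass that emits (key, count) pairs already in ascending order.
import Mathlib
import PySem

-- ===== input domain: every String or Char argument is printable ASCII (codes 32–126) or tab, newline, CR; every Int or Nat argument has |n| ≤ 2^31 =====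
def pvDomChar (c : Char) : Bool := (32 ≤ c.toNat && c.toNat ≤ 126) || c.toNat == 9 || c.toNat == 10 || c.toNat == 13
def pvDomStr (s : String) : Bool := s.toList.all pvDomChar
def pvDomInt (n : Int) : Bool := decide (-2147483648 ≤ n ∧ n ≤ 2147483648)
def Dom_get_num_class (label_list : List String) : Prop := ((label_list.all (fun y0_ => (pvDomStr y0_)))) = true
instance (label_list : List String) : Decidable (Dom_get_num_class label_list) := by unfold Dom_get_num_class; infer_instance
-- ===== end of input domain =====

-- B sorts all 3-char prefixes first and counts consecutive runs in one grouping pass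
-- (emitting pairs already in key order), instead of A's count-into-dict then sort-items-by-key;
-- objective: alternative (same exact result, different algorithm; not claimed faster).
-- The numpy-array guard of A is outside the List String domain and is not modelled.

-- ===== PORT A =====
def get_num_class (label_list : List String) : List (String × Int) :=
  let class_type : PySem.Dict String Int :=
    label_list.foldl (fun class_type node =>
      let class_name := PySem.Str.slice node none (some 3)
      if ¬ (class_type.contains class_name) then class_type.insert class_name 1
      else class_type.insert class_name (class_type.getD class_name 0 + 1))
      PySem.Dict.empty
  let b := PySem.List.sorted class_type.items (fun item => item.1)
  let test : PySem.Dict String Int :=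
    b.foldl (fun test node => test.insert node.1 node.2) PySem.Dict.empty
  test.items

-- ===== PORT B =====
def get_num_class_alt (label_list : List String) : List (String × Int) :=
  let prefixes := PySem.List.sorted
    (label_list.map (fun node => PySem.Str.slice node none (some 3))) (fun x => x)
  -- the run list is kept reversed (Python appends/updates at the back, Lean at the front)
  let runs := prefixes.foldl (fun runs p =>
      match runs with
      | (k, n) :: rest => if k = p then (p, n + 1) :: rest else (p, 1) :: (k, n) :: rest
      | [] => [(p, 1)]) []
  (PySem.Dict.ofList runs.reverse).items

-- ===== PRECONDITION & SPEC =====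
def Spec_get_num_class (label_list : List String) (out : List (String × Int)) : Prop := out = get_num_class_alt label_list
instance (label_list : List String) (out : List (String × Int)) : Decidable (Spec_get_num_class label_list out) := by unfold Spec_get_num_class; infer_instance

-- ===== CLAIM (what is proved, stated in full; the proofs are below) =====
def Claim_equal_get_num_class : Prop := ∀ (label_list : List String), Dom_get_num_class label_list → Spec_get_num_class label_list (get_num_class label_list)

-- ===== LEMMAS AND PROOFS =====

-- the step function of B's grouping pass
def pvStep (runs : List (String × Int)) (p : String) : List (String × Int) :=
  match runs with
  | (k, n) :: rest => if k = p then (p, n + 1) :: rest else (p, 1) :: (k, n) :: rest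
  | [] => [(p, 1)]

-- counts table of a list, in first-occurrence key order
def pvTab (l : List String) : List (String × Int) :=
  (PySem.Set.ofList l).map (fun k => (k, (l.count k : Int)))

lemma pvOfList_sublist (l : List String) : (PySem.Set.ofList l).Sublist l := by
  induction l with
  | nil => simp [PySem.Set.ofList_nil]
  | cons x xs ih =>
      rw [PySem.Set.ofList_cons]
      exact List.Sublist.cons₂ x (List.filter_sublist.trans ih)

lemma pvOfList_pairwise_lt (l : List String) (h : l.Pairwise (· ≤ ·)) :
    (PySem.Set.ofList l).Pairwise (· < ·) := by
  have hle : (PySem.Set.ofList l).Pairwise (· ≤ ·) := h.sublist (pvOfList_sublist l)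
  have hne : (PySem.Set.ofList l).Pairwise (· ≠ ·) := PySem.Set.nodup_ofList l
  exact (hle.and hne).imp (fun hx => lt_of_le_of_ne hx.1 hx.2)

lemma pvStep_tab (done : List String) (p : String)
    (hs : done.Pairwise (· ≤ ·)) (hle : ∀ x ∈ done, x ≤ p) :
    pvStep ((pvTab done).reverse) p = (pvTab (done ++ [p])).reverse := by
  by_cases hp : p ∈ done
  · -- p is the last key of the table; bump its count
    have hnd : (PySem.Set.ofList done).Nodup := PySem.Set.nodup_ofList done
    have hlt := pvOfList_pairwise_lt done hs
    have hpmem : p ∈ PySem.Set.ofList done := (PySem.Set.mem_ofList done p).2 hp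
    obtain ⟨I, J, hIJ⟩ := List.append_of_mem hpmem
    have hJ : J = [] := by
      cases J with
      | nil => rfl
      | cons y ys =>
          exfalso
          rw [hIJ] at hlt
          have hpy : p < y :=
            (List.pairwise_cons.1 (List.pairwise_append.1 hlt).2.1).1 y (by simp)
          have hyle : y ≤ p := hle y ((PySem.Set.mem_ofList done y).1 (hIJ ▸ (by simp)))
          exact absurd hyle (not_le.2 hpy)
    subst hJ
    have hpI : p ∉ I := by
      rw [hIJ] at hnd
      exact fun hmem => (List.disjoint_of_nodup_append hnd) hmem (by simp)
    have hof : PySem.Set.ofList (done ++ [p]) = I ++ [p] := by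
      rw [PySem.Set.ofList_append_singleton, PySem.Set.add_of_mem hpmem, hIJ]
    have hcnt : ∀ k ∈ I, (done ++ [p]).count k = done.count k := by
      intro k hk
      have hknp : k ≠ p := fun hkp => hpI (hkp ▸ hk)
      have hpk : ¬ p = k := fun h => hknp h.symm
      simp [List.count_append, hpk]
    have htab_new : pvTab (done ++ [p])
        = I.map (fun k => (k, (done.count k : Int))) ++ [(p, (done.count p : Int) + 1)] := by
      unfold pvTab
      rw [hof, List.map_append]
      congr 1
      · exact List.map_congr_left (fun k hk => by rw [hcnt k hk])
      · simp [List.count_append]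
    have htab_old : pvTab done
        = I.map (fun k => (k, (done.count k : Int))) ++ [(p, (done.count p : Int))] := by
      unfold pvTab
      rw [hIJ, List.map_append]
      simp
    rw [htab_new, htab_old]
    simp [pvStep]
  · -- fresh key: append a new run of length 1
    have hpmem : p ∉ PySem.Set.ofList done := fun hm => hp ((PySem.Set.mem_ofList done p).1 hm)
    have hof : PySem.Set.ofList (done ++ [p]) = PySem.Set.ofList done ++ [p] := by
      rw [PySem.Set.ofList_append_singleton, PySem.Set.add_of_not_mem hpmem]
    have htab_new : pvTab (done ++ [p]) = pvTab done ++ [(p, (1 : Int))] := by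
      unfold pvTab
      rw [hof, List.map_append]
      congr 1
      · refine List.map_congr_left (fun k hk => ?_)
        have hknp : k ≠ p := fun hkp => hp (hkp ▸ (PySem.Set.mem_ofList done k).1 hk)
        have hpk : ¬ p = k := fun h => hknp h.symm
        simp [List.count_append, hpk]
      · simp [List.count_append, List.count_eq_zero.2 hp]
    rw [htab_new, List.reverse_append]
    rcases hrev : (pvTab done).reverse with _ | ⟨⟨k, n⟩, rest⟩
    · simp [pvStep]
    · have hkI : k ∈ PySem.Set.ofList done := by
        have : (k, n) ∈ pvTab done := by
          rw [← List.mem_reverse, hrev]; simp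
        unfold pvTab at this
        obtain ⟨a, ha, hak⟩ := List.mem_map.1 this
        cases hak; exact ha
      have hknp : k ≠ p := fun hkp => hp (hkp ▸ (PySem.Set.mem_ofList done k).1 hkI)
      simp only [pvStep]
      rw [if_neg hknp]
      simp

lemma pvFold_tab (l : List String) (done : List String)
    (h : (done ++ l).Pairwise (· ≤ ·)) :
    l.foldl pvStep ((pvTab done).reverse) = (pvTab (done ++ l)).reverse := by
  induction l generalizing done with
  | nil => simp
  | cons p l ih =>
      have hs : done.Pairwise (· ≤ ·) :=
        (List.pairwise_append.1 h).1
      have hle : ∀ x ∈ done, x ≤ p :=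
        fun x hx => (List.pairwise_append.1 h).2.2 x hx p (by simp)
      have h' : ((done ++ [p]) ++ l).Pairwise (· ≤ ·) := by
        rw [List.append_assoc]; simpa using h
      calc (p :: l).foldl pvStep ((pvTab done).reverse)
          = l.foldl pvStep (pvStep ((pvTab done).reverse) p) := rfl
        _ = l.foldl pvStep ((pvTab (done ++ [p])).reverse) := by rw [pvStep_tab done p hs hle]
        _ = (pvTab ((done ++ [p]) ++ l)).reverse := ih (done ++ [p]) h'
        _ = (pvTab (done ++ p :: l)).reverse := by rw [List.append_assoc]; rfl

-- A's counting loop is Counter over the prefixes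
lemma pvA_counter (ps : List String) :
    ps.foldl (fun d x =>
      if ¬ (d.contains x) then d.insert x 1
      else d.insert x (d.getD x 0 + 1)) PySem.Dict.empty = PySem.Dict.counter ps := by
  have hfe : (fun (d : PySem.Dict String Int) x =>
      if ¬ (d.contains x) then d.insert x 1
      else d.insert x (d.getD x 0 + 1)) = fun d x => d.insert x (d.getD x 0 + 1) := by
    funext d x
    by_cases hc : d.contains x = true
    · simp [hc]
    · simp only [Bool.not_eq_true] at hc
      simp [hc, PySem.Dict.getD_of_not_contains d 0 hc]
  rw [hfe, PySem.Dict.foldl_insert_getD_add_one_eq_counter]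

lemma pvMain (label_list : List String) :
    get_num_class label_list = get_num_class_alt label_list := by
  unfold get_num_class get_num_class_alt
  set key : String → String := fun node => PySem.Str.slice node none (some 3) with hkey
  set ps : List String := label_list.map key with hps
  set prefixes : List String := PySem.List.sorted ps (fun x => x) with hpre
  -- A's counting loop is Counter over the prefixes
  have h1 : label_list.foldl (fun class_type node =>
      let class_name := key node
      if ¬ (class_type.contains class_name) then class_type.insert class_name 1
      else class_type.insert class_name (class_type.getD class_name 0 + 1))
      PySem.Dict.empty = PySem.Dict.counter ps := by
    rw [hps, ← pvA_counter (label_list.map key), List.foldl_map]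
  rw [h1]
  -- zeta-reduce the let-bindings of both ports
  show ((PySem.List.sorted (PySem.Dict.counter ps).items (fun item => item.1)).foldl
      (fun test node => test.insert node.1 node.2) PySem.Dict.empty).items
    = (PySem.Dict.ofList ((prefixes.foldl (fun runs p =>
        match runs with
        | (k, n) :: rest => if k = p then (p, n + 1) :: rest else (p, 1) :: (k, n) :: rest
        | [] => [(p, 1)]) ([] : List (String × Int))).reverse)).items
  rw [PySem.Dict.items_counter]
  -- B's grouping pass computes the count table of the sorted prefixes
  have h2 : prefixes.foldl (fun runs p =>
      match runs with
      | (k, n) :: rest => if k = p then (p, n + 1) :: rest else (p, 1) :: (k, n) :: rest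
      | [] => [(p, 1)]) ([] : List (String × Int)) = (pvTab prefixes).reverse := by
    have h0 : (pvTab ([] : List String)).reverse = [] := by
      simp [pvTab, PySem.Set.ofList_nil]
    rw [show (fun (runs : List (String × Int)) p =>
      match runs with
      | (k, n) :: rest => if k = p then (p, n + 1) :: rest else (p, 1) :: (k, n) :: rest
      | [] => [(p, 1)]) = pvStep from rfl, ← h0, pvFold_tab prefixes [] (by
        simpa using PySem.List.sorted_pairwise ps (fun x => x))]
    rfl
  rw [h2, List.reverse_reverse]
  -- both final dict builds insert distinct fresh keys: items = the pair list itself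
  have hfresh : ∀ (rs : List (String × Int)), (rs.map Prod.fst).Nodup →
      (rs.foldl (fun d node => d.insert node.1 node.2) PySem.Dict.empty).items = rs := by
    intro rs hnd
    rw [PySem.Dict.items_foldl_insert_fresh rs Prod.fst Prod.snd PySem.Dict.empty
      (fun a _ => PySem.Dict.contains_empty a.1) hnd]
    simp [PySem.Dict.empty]
  have hmapfst : ∀ (m : List String),
      ((pvTab m).map Prod.fst) = PySem.Set.ofList m := by
    intro m; simp [pvTab, List.map_map, Function.comp_def]
  -- the sorted count table of ps IS the count table of sorted ps
  have hperm : (pvTab prefixes).Perm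
      ((PySem.Set.ofList ps).map fun k => (k, (List.count k ps : Int))) := by
    have hofperm : (PySem.Set.ofList prefixes).Perm (PySem.Set.ofList ps) := by
      refine (List.perm_ext_iff_of_nodup (PySem.Set.nodup_ofList _)
        (PySem.Set.nodup_ofList _)).2 (fun a => ?_)
      simp only [PySem.Set.mem_ofList]
      rw [hpre]
      exact PySem.List.mem_sorted ps (fun x => x) false a
    have hcnt : ∀ k, List.count k prefixes = List.count k ps :=
      fun k => (PySem.List.sorted_perm ps (fun x => x) false).count_eq k
    have : pvTab prefixes
        = (PySem.Set.ofList prefixes).map fun k => (k, (List.count k ps : Int)) := by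
      unfold pvTab
      exact List.map_congr_left (fun k _ => by rw [hcnt k])
    rw [this]
    exact hofperm.map _
  have hpair : (pvTab prefixes).Pairwise (fun a b => a.1 < b.1) := by
    have := pvOfList_pairwise_lt prefixes
      (by simpa using PySem.List.sorted_pairwise ps (fun x => x))
    unfold pvTab
    exact List.pairwise_map.2 (by simpa using this)
  rw [PySem.List.sorted_eq_of_perm_of_pairwise_lt _ (pvTab prefixes) _ hperm hpair]
  rw [hfresh _ (by rw [hmapfst]; exact PySem.Set.nodup_ofList _)]
  -- B side: dict(runs) over the distinct run keys
  show _ = (PySem.Dict.ofList (pvTab prefixes)).items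
  rw [show (PySem.Dict.ofList (pvTab prefixes))
      = (pvTab prefixes).foldl (fun d node => d.insert node.1 node.2) PySem.Dict.empty from rfl]
  rw [hfresh _ (by rw [hmapfst]; exact PySem.Set.nodup_ofList _)]

-- ===== VERDICT (by name: the statement is the Claim_ definition above) =====
theorem get_num_class_spec : Claim_equal_get_num_class := by
  intro l _
  unfold Spec_get_num_class
  exact pvMain l
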